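-- pv_equiv track=rewrite | github.com/taaaaryu/lab | Opti/cdf-redundancy.py | generate_service_combinations
-- ===== SOURCE A (Python) =====
-- from itertools import combinations, chain, product
--
-- num_software = 3
--
-- def generate_service_combinations(services):
--     all_combinations = []
--     n = len(services)
--     for indices in combinations(range(n - 1), num_software - 1):
--         split_indices = list(chain([-1], indices, [n - 1]))
--         combination = [services[split_indices[i] + 1: split_indices[i + 1] + 1] for i in range(len(split_indices) - 1)]
--         all_combinations.append(combination)
--     return all_combinations
-- ===== SOURCE B (Python) =====
-- num_software = 3
--
-- def generate_service_combinations(services):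
--     n = len(services)
--
--     def helper(start, groups_left):
--         if groups_left == 1:
--             return [[services[start:]]] if start < n else []
--         result = []
--         for end in range(start + 1, n):
--             head = services[start:end]
--             for tail in helper(end, groups_left - 1):
--                 result.append([head] + tail)
--         return result
--
--     return helper(0, num_software)
-- ===== Notes on version B (the rewrite author's own statement) =====
-- stated objective: alternative
-- what changed: Replaces the combinations-of-cut-points pass (choose 2 split indices from range(n-1), then slice via a chained index list) with a recursive composition builder helper(groups_left, start) that emits the first block and recurses on the rest, in ascending first-block order so the output order matches.
import Mathlib
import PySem

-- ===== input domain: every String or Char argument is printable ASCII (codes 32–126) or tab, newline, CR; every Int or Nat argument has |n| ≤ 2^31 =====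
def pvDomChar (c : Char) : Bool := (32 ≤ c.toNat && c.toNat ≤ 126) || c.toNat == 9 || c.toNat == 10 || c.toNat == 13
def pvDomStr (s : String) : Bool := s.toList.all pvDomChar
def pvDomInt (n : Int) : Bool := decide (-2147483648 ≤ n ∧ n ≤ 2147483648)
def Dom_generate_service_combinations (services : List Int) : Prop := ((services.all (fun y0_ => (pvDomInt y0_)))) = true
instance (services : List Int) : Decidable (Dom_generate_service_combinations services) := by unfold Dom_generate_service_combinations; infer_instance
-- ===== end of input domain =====

-- B replaces A's combinations-of-cut-points enumeration by a recursive composition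
-- builder (different decomposition, same cost); return values are proved equal everywhere.

-- ===== PORT A =====
-- itertools.combinations(l, k) in its lazy lexicographic order
def pvCombos : Nat → List Int → List (List Int)
  | 0, _ => [[]]
  | _+1, [] => []
  | k+1, x :: xs => ((pvCombos k xs).map (fun c => x :: c)) ++ pvCombos (k+1) xs

def generate_service_combinations (services : List Int) : List (List (List Int)) :=
  let n : Int := services.length
  -- num_software = 3 in the module
  (pvCombos (3 - 1) (PySem.List.pyRange 0 (n - 1) 1)).foldl
    (fun all_combinations indices =>
      let split_indices : List Int := [-1] ++ indices ++ [n - 1]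
      -- split_indices[i] is always a valid non-negative index here, so getD is exact
      let combination := (List.range (split_indices.length - 1)).map
        (fun i => PySem.List.slice services (some (split_indices.getD i 0 + 1))
                                            (some (split_indices.getD (i+1) 0 + 1)))
      all_combinations ++ [combination]) []

-- ===== PORT B =====
-- helper(start, groups_left) of Source B; first argument of the match is groups_left
def gscHelper (services : List Int) (n : Int) : Nat → Int → List (List (List Int))
  | 0, _ => []   -- groups_left ≤ 0: Source B's recursion returns [] here (never reached from 3)
  | 1, start => if start < n then [[PySem.List.slice services (some start) none]] else []
  | g+2, start =>
      (PySem.List.pyRange (start + 1) n 1).foldl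
        (fun result e =>
          result ++ (gscHelper services n (g+1) e).map
            (fun tail => PySem.List.slice services (some start) (some e) :: tail)) []

def generate_service_combinations_alt (services : List Int) : List (List (List Int)) :=
  gscHelper services services.length 3 0

-- ===== PRECONDITION & SPEC =====
def Spec_generate_service_combinations (services : List Int) (out : List (List (List Int))) : Prop := out = generate_service_combinations_alt services
instance (services : List Int) (out : List (List (List Int))) : Decidable (Spec_generate_service_combinations services out) := by unfold Spec_generate_service_combinations; infer_instance

-- ===== CLAIM (what is proved, stated in full; the proofs are below) =====
def Claim_equal_generate_service_combinations : Prop := ∀ (services : List Int), Dom_generate_service_combinations services → Spec_generate_service_combinations services (generate_service_combinations services)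

-- ===== LEMMAS AND PROOFS =====

theorem pv_foldl_append_flatMap {α β : Type} (l : List α) (g : α → List β) (init : List β) :
    l.foldl (fun acc x => acc ++ g x) init = init ++ l.flatMap g := by
  induction l generalizing init with
  | nil => simp
  | cons x xs ih => simp [List.foldl_cons, ih, List.append_assoc]

theorem pvCombos_one (l : List Int) : pvCombos 1 l = l.map (fun x => [x]) := by
  induction l with
  | nil => rfl
  | cons x xs ih => simp [pvCombos, ih]

theorem pvCombos_two_range (b : Int) : ∀ (N : ℕ) (a : Int), (b - a).toNat ≤ N →
    pvCombos 2 (PySem.List.pyRange a b 1) =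
      (PySem.List.pyRange a b 1).flatMap
        (fun i => (PySem.List.pyRange (i+1) b 1).map (fun j => [i, j])) := by
  intro N
  induction N with
  | zero =>
      intro a h
      rw [PySem.List.pyRange_one_eq_nil (by omega)]
      rfl
  | succ N ih =>
      intro a h
      by_cases hab : a < b
      · rw [PySem.List.pyRange_one_cons hab]
        show ((pvCombos 1 _).map _) ++ pvCombos 2 _ = _
        rw [pvCombos_one, ih (a+1) (by omega)]
        simp [List.flatMap_cons, List.map_map, Function.comp]
      · rw [PySem.List.pyRange_one_eq_nil (by omega)]
        rfl

theorem pv_range_shift (a b : Int) :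
    PySem.List.pyRange (a+1) (b+1) 1 = (PySem.List.pyRange a b 1).map (· + 1) := by
  rw [PySem.List.pyRange_one, PySem.List.pyRange_one, List.map_map]
  have h : b + 1 - (a + 1) = b - a := by ring
  rw [h]
  apply List.map_congr_left
  intro k _
  simp [Function.comp]
  ring

theorem pv_slice_from_to_length (xs : List Int) (a : Int) (ha : 0 ≤ a) :
    PySem.List.slice xs (some a) (some (xs.length : Int)) = PySem.List.slice xs (some a) none := by
  rw [PySem.List.slice_toNat xs ha (by positivity), PySem.List.slice_from xs ha]
  exact List.take_of_length_le (by simp)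

-- A, flattened: one flatMap over the lower cut i, a map over the upper cut j
theorem pvA_flat (s : List Int) :
    generate_service_combinations s =
      (PySem.List.pyRange 0 ((s.length : Int) - 1) 1).flatMap
        (fun i => (PySem.List.pyRange (i+1) ((s.length : Int) - 1) 1).map
          (fun j => [PySem.List.slice s (some 0) (some (i+1)),
                     PySem.List.slice s (some (i+1)) (some (j+1)),
                     PySem.List.slice s (some (j+1)) (some (s.length : Int))])) := by
  show (pvCombos 2 _).foldl _ [] = _
  rw [PySem.List.foldl_append_singleton_eq_map]
  rw [pvCombos_two_range ((s.length : Int) - 1) ((s.length : Int) - 1 - 0).toNat 0 le_rfl]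
  rw [List.map_flatMap]
  apply List.flatMap_congr
  intro i _
  rw [List.map_map]
  apply List.map_congr_left
  intro j _
  simp only [Function.comp_apply]
  show (List.range (([-1] ++ [i, j] ++ [(s.length : Int) - 1]).length - 1)).map _ = _
  have h3 : ([-1] ++ [i, j] ++ [(s.length : Int) - 1]).length - 1 = 3 := by simp
  rw [h3]
  have hn : (s.length : Int) - 1 + 1 = (s.length : Int) := by ring
  have h0 : (-1 : Int) + 1 = 0 := by norm_num
  simp only [List.range_succ, List.range_zero, List.nil_append, List.map_cons,
    List.map_nil, List.cons_append, List.getD, List.getElem?_cons_zero, List.getElem?_cons_succ,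
    Option.getD_some, hn, h0]

-- helper(start, 2), flattened to a map over the middle cut
theorem gscHelper_two (s : List Int) (n start : Int) :
    gscHelper s n 2 start =
      (PySem.List.pyRange (start+1) n 1).map
        (fun e => [PySem.List.slice s (some start) (some e), PySem.List.slice s (some e) none]) := by
  show (PySem.List.pyRange (start+1) n 1).foldl _ [] = _
  rw [pv_foldl_append_flatMap]
  rw [List.nil_append]
  rw [show ((PySem.List.pyRange (start+1) n 1).map
      (fun e => [PySem.List.slice s (some start) (some e), PySem.List.slice s (some e) none]))
      = (PySem.List.pyRange (start+1) n 1).flatMap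
        (fun e => [[PySem.List.slice s (some start) (some e), PySem.List.slice s (some e) none]]) by
    induction (PySem.List.pyRange (start+1) n 1) with
    | nil => rfl
    | cons x xs ih => simp [ih]]
  apply List.flatMap_congr
  intro e he
  have hlt : e < n := (PySem.List.mem_pyRange_one.1 he).2
  simp [gscHelper, hlt]

-- helper(0, 3), flattened
theorem gscHelper_three (s : List Int) (n : Int) :
    gscHelper s n 3 0 =
      (PySem.List.pyRange 1 n 1).flatMap
        (fun e1 => (PySem.List.pyRange (e1+1) n 1).map
          (fun e2 => [PySem.List.slice s (some 0) (some e1),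
                      PySem.List.slice s (some e1) (some e2),
                      PySem.List.slice s (some e2) none])) := by
  show (PySem.List.pyRange (0+1) n 1).foldl _ [] = _
  rw [pv_foldl_append_flatMap, List.nil_append, zero_add]
  apply List.flatMap_congr
  intro e1 _
  rw [gscHelper_two, List.map_map]
  rfl

theorem generate_service_combinations_eq (s : List Int) :
    generate_service_combinations s = generate_service_combinations_alt s := by
  rw [pvA_flat]
  show _ = gscHelper s (s.length : Int) 3 0
  rw [gscHelper_three]
  have h1 : PySem.List.pyRange 1 (s.length : Int) 1
      = (PySem.List.pyRange 0 ((s.length : Int) - 1) 1).map (· + 1) := by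
    have := pv_range_shift 0 ((s.length : Int) - 1)
    simpa using this
  rw [h1, List.flatMap_map]
  apply List.flatMap_congr
  intro i hi
  have hi0 : 0 ≤ i := (PySem.List.mem_pyRange_one.1 hi).1
  have h2 : PySem.List.pyRange (i + 1 + 1) (s.length : Int) 1
      = (PySem.List.pyRange (i+1) ((s.length : Int) - 1) 1).map (· + 1) := by
    have := pv_range_shift (i+1) ((s.length : Int) - 1)
    simpa using this
  rw [h2, List.map_map]
  apply List.map_congr_left
  intro j hj
  have hj0 : i + 1 ≤ j := (PySem.List.mem_pyRange_one.1 hj).1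
  simp only [Function.comp]
  rw [pv_slice_from_to_length s (j+1) (by omega)]

-- ===== VERDICT (by name: the statement is the Claim_ definition above) =====
theorem generate_service_combinations_spec : Claim_equal_generate_service_combinations := by
  intro services _
  exact generate_service_combinations_eq services
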